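-- pv_equiv track=rewrite | github.com/RafaelPedruzzi/IA-2019-1 | hillClimbing.py | state_Select
-- ===== SOURCE A (Python) =====
-- T = 19 # bag size
--
-- OBJs = [(1,3), (4,6), (5,7)] # object list (v,t)
--
-- def value(obj):
--     return obj[0]
--
-- def size(obj):
--     return obj[1]
--
-- def state_Value(st):
--     v = 0
--     for i in range(len(st)):
--         v += st[i] * value(OBJs[i])
--     return v
--
-- def state_Size(st):
--     s = 0
--     for i in range(len(st)):
--         s += st[i] * size(OBJs[i])
--     return s
--
-- def state_Verify(st):
--     if state_Size(st) <= T: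
--         return True
--     return False
--
-- def state_Select(si):
--     sn = -1
--     sv = 0 # state value
--     for i in range(len(si)):
--         v = state_Value(si[i]) # current value
--         if state_Verify(si[i]) and v > sv:
--             sv = v
--             sn = i
--     if sn == -1:
--         return False, []
--     return True, si[sn]
-- ===== SOURCE B (Python) =====
-- T = 19 # bag size
--
-- OBJs = [(1,3), (4,6), (5,7)] # object list (v,t)
--
-- def state_Value(st):
--     return sum(st[i] * OBJs[i][0] for i in range(len(st)))
--
-- def state_Size(st):
--     return sum(st[i] * OBJs[i][1] for i in range(len(st)))
--
-- def state_Select(si):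
--     # order candidates by (value descending, original index ascending), then
--     # return the first one that is positive-valued and fits in the bag
--     for i, st in sorted(enumerate(si), key=lambda p: (-state_Value(p[1]), p[0])):
--         if state_Value(st) > 0 and state_Size(st) <= T:
--             return True, st
--     return False, []
-- ===== Notes on version B (the rewrite author's own statement) =====
-- stated objective: alternative
-- what changed: A's single-pass argmax-with-feasibility loop is replaced by a stable sort of the (index, state) pairs on (value descending, index ascending) followed by a scan returning the first positive-valued candidate that fits in the bag.
import Mathlib
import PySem

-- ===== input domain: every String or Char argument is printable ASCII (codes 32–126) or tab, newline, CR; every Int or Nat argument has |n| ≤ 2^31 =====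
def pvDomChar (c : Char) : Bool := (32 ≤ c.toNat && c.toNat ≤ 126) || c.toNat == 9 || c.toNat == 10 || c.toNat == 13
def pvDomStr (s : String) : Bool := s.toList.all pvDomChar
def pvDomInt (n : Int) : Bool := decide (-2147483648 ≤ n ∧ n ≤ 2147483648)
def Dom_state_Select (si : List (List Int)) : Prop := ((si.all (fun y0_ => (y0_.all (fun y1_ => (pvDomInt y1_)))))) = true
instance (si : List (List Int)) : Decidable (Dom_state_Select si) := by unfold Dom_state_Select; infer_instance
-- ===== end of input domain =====

-- B replaces A's single-pass argmax loop by a stable sort of (index, state) pairs on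
-- (value descending, index ascending) followed by a scan for the first feasible candidate
-- (objective: alternative decomposition, not claimed faster).

-- ===== PORT A =====
def pvT : Int := 19

def pvOBJs : List (Int × Int) := [(1,3), (4,6), (5,7)]

def pvValue (obj : Int × Int) : Int := obj.1

def pvSize (obj : Int × Int) : Int := obj.2

def state_Value_A (st : List Int) : Int :=
  (PySem.List.pyRange 0 (st.length : Int) 1).foldl
    (fun v i => v + (PySem.List.pyGetD st i 0) * pvValue (PySem.List.pyGetD pvOBJs i (0,0))) 0

def state_Size_A (st : List Int) : Int :=
  (PySem.List.pyRange 0 (st.length : Int) 1).foldl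
    (fun s i => s + (PySem.List.pyGetD st i 0) * pvSize (PySem.List.pyGetD pvOBJs i (0,0))) 0

def state_Verify_A (st : List Int) : Bool :=
  if state_Size_A st ≤ pvT then true else false

def state_Select (si : List (List Int)) : Bool × List Int :=
  let r := (PySem.List.pyRange 0 (si.length : Int) 1).foldl
    (fun (acc : Int × Int) i =>
      let v := state_Value_A (PySem.List.pyGetD si i [])
      if state_Verify_A (PySem.List.pyGetD si i []) = true ∧ v > acc.2 then (i, v) else acc)
    (-1, 0)
  if r.1 = -1 then (false, []) else (true, PySem.List.pyGetD si r.1 [])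

-- ===== PORT B =====
-- B's helpers sum st[i] * OBJs[i][k] over range(len(st)), like a comprehension
def state_Value_B (st : List Int) : Int :=
  (PySem.List.pyRange 0 (st.length : Int) 1).foldl
    (fun v i => v + (PySem.List.pyGetD st i 0) * (PySem.List.pyGetD pvOBJs i (0,0)).1) 0

def state_Size_B (st : List Int) : Int :=
  (PySem.List.pyRange 0 (st.length : Int) 1).foldl
    (fun s i => s + (PySem.List.pyGetD st i 0) * (PySem.List.pyGetD pvOBJs i (0,0)).2) 0

def pvScanB : List (Int × List Int) → Bool × List Int
  | [] => (false, [])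
  | p :: rest =>
      if 0 < state_Value_B p.2 ∧ state_Size_B p.2 ≤ pvT then (true, p.2) else pvScanB rest

def state_Select_alt (si : List (List Int)) : Bool × List Int :=
  pvScanB (PySem.List.sorted2 (PySem.List.enumerate si 0)
    (fun p => -(state_Value_B p.2)) (fun p => p.1) false)

-- ===== PRECONDITION & SPEC =====
-- Pre_ excludes exactly the inputs on which both Pythons raise IndexError: a state longer
-- than the 3-element object list OBJs makes state_Value index OBJs out of range.
def Pre_state_Select (si : List (List Int)) : Prop := ∀ st ∈ si, st.length ≤ 3
instance (si : List (List Int)) : Decidable (Pre_state_Select si) := by unfold Pre_state_Select; infer_instance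

def pvWitness_state_Select : List (List Int) := [[1, 0, 1], [2, 2], []]

def Spec_state_Select (si : List (List Int)) (out : Bool × List Int) : Prop := out = state_Select_alt si
instance (si : List (List Int)) (out : Bool × List Int) : Decidable (Spec_state_Select si out) := by unfold Spec_state_Select; infer_instance

-- ===== CLAIM (what is proved, stated in full; the proofs are below) =====
def Claim_equal_state_Select : Prop := ∀ (si : List (List Int)), Dom_state_Select si → Pre_state_Select si → Spec_state_Select si (state_Select si)

-- ===== LEMMAS AND PROOFS =====

-- the sort key B orders by: (-value, index), lexicographically
def pvKey (p : Int × List Int) : Lex (Int × Int) := toLex (-(state_Value_B p.2), p.1)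

-- running strict-max step over (index, value) pairs
def pvStep' (a c : Int × Int) : Int × Int := if a.2 < c.2 then c else a

-- the feasible (index, value) pairs, in index order
def pvCands (si : List (List Int)) : List (Int × Int) :=
  ((PySem.List.enumerate si 0).filter (fun p => decide (state_Size_B p.2 ≤ pvT))).map
    (fun p => (p.1, state_Value_B p.2))

-- A's helpers compute the same sums as B's
lemma pv_val_eq (st : List Int) : state_Value_A st = state_Value_B st := rfl

lemma pv_size_eq (st : List Int) : state_Size_A st = state_Size_B st := rfl

-- enumerate of a snoc
lemma pv_enumerate_append {α : Type} (xs : List α) (x : α) (s : Int) :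
    PySem.List.enumerate (xs ++ [x]) s = PySem.List.enumerate xs s ++ [((s + xs.length : Int), x)] := by
  induction xs generalizing s with
  | nil => simp [PySem.List.enumerate_cons, PySem.List.enumerate_nil]
  | cons y ys ih =>
    simp [PySem.List.enumerate_cons, ih (s + 1)]
    omega

-- membership in enumerate, explicitly
lemma pv_mem_enumerate {α : Type} {xs : List α} {s : Int} {p : Int × α}
    (h : p ∈ PySem.List.enumerate xs s) :
    ∃ k : Nat, ∃ hk : k < xs.length, p = ((s + k : Int), xs[k]) := by
  induction xs generalizing s with
  | nil => simp [PySem.List.enumerate_nil] at h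
  | cons y ys ih =>
    rw [PySem.List.enumerate_cons] at h
    rcases List.mem_cons.mp h with h1 | h2
    · exact ⟨0, by simp, by simpa using h1⟩
    · obtain ⟨k, hk, hp⟩ := ih h2
      exact ⟨k + 1, by simpa using hk, by simp [hp]; ring⟩

-- fst of a member of enumerate from 0 is nonnegative
lemma pv_enum_fst_nonneg {α : Type} {xs : List α} {p : Int × α}
    (h : p ∈ PySem.List.enumerate xs 0) : 0 ≤ p.1 := by
  obtain ⟨k, hk, hp⟩ := pv_mem_enumerate h
  simp [hp]

-- a member of enumerate from 0 is its own lookup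
lemma pv_enum_pyGetD {α : Type} {xs : List α} {p : Int × α} (d : α)
    (h : p ∈ PySem.List.enumerate xs 0) : PySem.List.pyGetD xs p.1 d = p.2 := by
  obtain ⟨k, hk, hp⟩ := pv_mem_enumerate h
  subst hp
  rw [PySem.List.pyGetD_eq_getElem xs d (by simp) (by simpa using hk)]
  simp

-- fst determines a member of enumerate
lemma pv_enum_fst_inj {α : Type} {xs : List α} {s : Int} {p q : Int × α}
    (hp : p ∈ PySem.List.enumerate xs s) (hq : q ∈ PySem.List.enumerate xs s)
    (h : p.1 = q.1) : p = q := by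
  obtain ⟨k, hk, hpk⟩ := pv_mem_enumerate hp
  obtain ⟨l, hl, hql⟩ := pv_mem_enumerate hq
  subst hpk; subst hql
  simp only at h
  have : k = l := by omega
  subst this; rfl

-- A's index loop is the fold of the same body over enumerate
lemma pv_fold_enum {β : Type} (f : (Int × Int) → Int → β → (Int × Int)) (d : β)
    (xs : List β) (acc : Int × Int) :
    (PySem.List.pyRange 0 (xs.length : Int) 1).foldl (fun a i => f a i (PySem.List.pyGetD xs i d)) acc
      = (PySem.List.enumerate xs 0).foldl (fun a p => f a p.1 p.2) acc := by
  induction xs using List.reverseRecOn with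
  | nil => simp [PySem.List.pyRange_one_eq_nil, PySem.List.enumerate_nil]
  | append_singleton ys x ih =>
    have hlen : ((ys ++ [x]).length : Int) = (ys.length : Int) + 1 := by simp
    rw [hlen, PySem.List.pyRange_one_succ_right (by positivity), List.foldl_append,
      pv_enumerate_append, List.foldl_append]
    have hcongr : (PySem.List.pyRange 0 (ys.length : Int) 1).foldl
        (fun a i => f a i (PySem.List.pyGetD (ys ++ [x]) i d)) acc
        = (PySem.List.pyRange 0 (ys.length : Int) 1).foldl
        (fun a i => f a i (PySem.List.pyGetD ys i d)) acc := by
      apply PySem.List.foldl_congr_mem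
      intro a i hi
      have hb := PySem.List.mem_pyRange_one.mp hi
      have h1 : PySem.List.pyGetD (ys ++ [x]) i d = (ys ++ [x])[i.toNat]'(by simp; omega) :=
        PySem.List.pyGetD_eq_getElem _ _ hb.1 (by simp; omega)
      have h2 : PySem.List.pyGetD ys i d = ys[i.toNat]'(by omega) :=
        PySem.List.pyGetD_eq_getElem _ _ hb.1 (by omega)
      rw [h1, h2, List.getElem_append_left]
    rw [hcongr, ih]
    have hx : PySem.List.pyGetD (ys ++ [x]) ((ys.length : Int)) d = x := by
      rw [PySem.List.pyGetD_eq_getElem _ _ (by positivity) (by simp)]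
      simp
    simp [hx]

-- pushing the feasibility test of A's loop body into a filter and a map
lemma pv_fold_filter_map (l : List (Int × List Int)) (acc : Int × Int) :
    l.foldl (fun a p => if state_Size_B p.2 ≤ pvT ∧ a.2 < state_Value_B p.2
        then (p.1, state_Value_B p.2) else a) acc
      = ((l.filter (fun p => decide (state_Size_B p.2 ≤ pvT))).map
          (fun p => (p.1, state_Value_B p.2))).foldl pvStep' acc := by
  induction l generalizing acc with
  | nil => rfl
  | cons p rest ih =>
    by_cases hs : state_Size_B p.2 ≤ pvT
    · by_cases hv : acc.2 < state_Value_B p.2 <;>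
        simp [hs, hv, ih, pvStep']
    · simp [hs, ih]

-- the candidate list has strictly increasing indices
lemma pv_cands_pairwise (si : List (List Int)) :
    (pvCands si).Pairwise (fun a b => a.1 < b.1) := by
  have h0 : (PySem.List.enumerate si 0).Pairwise (fun p q : Int × List Int => p.1 < q.1) := by
    have h1 := PySem.List.pairwise_lt_pyRange_one (a := 0) (b := (si.length : Int))
    have hmap := PySem.List.map_fst_enumerate si 0
    simp only [zero_add] at hmap
    rw [← hmap, List.pairwise_map] at h1
    exact h1
  unfold pvCands
  rw [List.pairwise_map]
  exact (h0.filter _)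

-- characterisation of the strict running max over pairs with increasing indices
lemma pv_argmax (m : List (Int × Int)) (hm : m.Pairwise (fun a b => a.1 < b.1)) :
    (m.foldl pvStep' ((-1 : Int), (0 : Int)) = ((-1 : Int), (0 : Int)) ∧ ∀ c ∈ m, c.2 ≤ 0) ∨
    (m.foldl pvStep' ((-1 : Int), (0 : Int)) ∈ m ∧ 0 < (m.foldl pvStep' ((-1 : Int), (0 : Int))).2 ∧
      ∀ c ∈ m, c.2 < (m.foldl pvStep' ((-1 : Int), (0 : Int))).2 ∨
        (c.2 = (m.foldl pvStep' ((-1 : Int), (0 : Int))).2 ∧ (m.foldl pvStep' ((-1 : Int), (0 : Int))).1 ≤ c.1)) := by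
  induction m using List.reverseRecOn with
  | nil => left; exact ⟨rfl, by simp⟩
  | append_singleton ys x ih =>
    rw [List.pairwise_append] at hm
    obtain ⟨hys, -, hcross⟩ := hm
    have hcross' : ∀ c ∈ ys, c.1 < x.1 := fun c hc => hcross c hc x (by simp)
    rw [List.foldl_append]
    simp only [List.foldl_cons, List.foldl_nil]
    rcases ih hys with ⟨heq, hall⟩ | ⟨hmem, hpos, hmin⟩
    · rw [heq]
      by_cases hx : (0 : Int) < x.2
      · right
        have hstep : pvStep' ((-1 : Int), (0 : Int)) x = x := by simp [pvStep', hx]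
        rw [hstep]
        refine ⟨by simp, hx, ?_⟩
        intro c hc
        rcases List.mem_append.mp hc with hc | hc
        · exact Or.inl (lt_of_le_of_lt (hall c hc) hx)
        · simp at hc; subst hc; exact Or.inr ⟨rfl, le_refl _⟩
      · left
        have hstep : pvStep' ((-1 : Int), (0 : Int)) x = ((-1 : Int), (0 : Int)) := by
          simp [pvStep']; omega
        refine ⟨hstep, ?_⟩
        intro c hc
        rcases List.mem_append.mp hc with hc | hc
        · exact hall c hc
        · simp at hc; subst hc; omega
    · set r := ys.foldl pvStep' ((-1 : Int), (0 : Int)) with hr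
      by_cases hx : r.2 < x.2
      · right
        have hstep : pvStep' r x = x := by simp [pvStep', hx]
        rw [hstep]
        refine ⟨by simp, lt_trans hpos hx, ?_⟩
        intro c hc
        rcases List.mem_append.mp hc with hc | hc
        · rcases hmin c hc with h | ⟨h, -⟩
          · exact Or.inl (lt_trans h hx)
          · exact Or.inl (h ▸ hx)
        · simp at hc; subst hc; exact Or.inr ⟨rfl, le_refl _⟩
      · right
        have hstep : pvStep' r x = r := by simp [pvStep']; omega
        rw [hstep]
        refine ⟨List.mem_append.mpr (Or.inl hmem), hpos, ?_⟩
        intro c hc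
        rcases List.mem_append.mp hc with hc | hc
        · exact hmin c hc
        · simp at hc; subst hc
          rcases lt_or_eq_of_le (not_lt.mp hx) with h | h
          · exact Or.inl h
          · exact Or.inr ⟨h, le_of_lt (hcross' r hmem)⟩

-- B's sort on two keys is the sort on the lexicographic pair key
lemma pv_sorted2_eq (xs : List (Int × List Int)) :
    PySem.List.sorted2 xs (fun p => -(state_Value_B p.2)) (fun p => p.1) false
      = PySem.List.sorted xs pvKey false := by
  have hb : (fun (a b : Int × List Int) =>
        decide ((-(state_Value_B a.2)) < -(state_Value_B b.2)) ||
          (!decide ((-(state_Value_B b.2)) < -(state_Value_B a.2)) && decide (a.1 < b.1)))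
      = (fun a b => decide (pvKey a < pvKey b)) := by
    funext a b
    by_cases h1 : (-(state_Value_B a.2)) < -(state_Value_B b.2)
    · simp [h1, pvKey, Prod.Lex.toLex_lt_toLex]
    · by_cases h2 : (-(state_Value_B b.2)) < -(state_Value_B a.2)
      · simp [h1, h2, pvKey, Prod.Lex.toLex_lt_toLex]
        omega
      · simp [h1, h2, pvKey, Prod.Lex.toLex_lt_toLex]
        omega
  simp only [PySem.List.sorted2, PySem.List.sorted]
  rw [hb]
  rfl

-- the sorted enumeration is strictly increasing in the key
lemma pv_sorted_strict (si : List (List Int)) :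
    (PySem.List.sorted (PySem.List.enumerate si 0) pvKey false).Pairwise
      (fun a b => pvKey a < pvKey b) := by
  have hle := PySem.List.sorted_pairwise (PySem.List.enumerate si 0) pvKey
  have hnd0 : ((PySem.List.enumerate si 0).map pvKey).Nodup := by
    have hfst : ((PySem.List.enumerate si 0).map (fun p => p.1)).Nodup := by
      rw [PySem.List.map_fst_enumerate]
      exact PySem.List.nodup_pyRange_one 0 _
    have : (((PySem.List.enumerate si 0).map pvKey).map (fun k => (ofLex k).2)).Nodup := by
      rw [List.map_map]
      exact hfst
    exact this.of_map _
  have hnd : ((PySem.List.sorted (PySem.List.enumerate si 0) pvKey false).map pvKey).Nodup :=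
    (((PySem.List.sorted_perm (PySem.List.enumerate si 0) pvKey false).map pvKey).nodup_iff).mpr hnd0
  have hne : (PySem.List.sorted (PySem.List.enumerate si 0) pvKey false).Pairwise
      (fun a b => pvKey a ≠ pvKey b) :=
    List.pairwise_map.mp hnd
  exact (hle.and hne).imp (fun ⟨h1, h2⟩ => lt_of_le_of_ne h1 h2)

-- characterisation of B's scan over a strictly key-increasing list
lemma pv_scan_char (js : List (Int × List Int))
    (hp : js.Pairwise (fun a b => pvKey a < pvKey b)) :
    (pvScanB js = (false, []) ∧
        ∀ p ∈ js, ¬(0 < state_Value_B p.2 ∧ state_Size_B p.2 ≤ pvT)) ∨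
    (∃ p ∈ js, (0 < state_Value_B p.2 ∧ state_Size_B p.2 ≤ pvT) ∧ pvScanB js = (true, p.2) ∧
        ∀ q ∈ js, (0 < state_Value_B q.2 ∧ state_Size_B q.2 ≤ pvT) → pvKey p ≤ pvKey q) := by
  induction js with
  | nil => left; exact ⟨rfl, by simp⟩
  | cons p rest ih =>
    rw [List.pairwise_cons] at hp
    obtain ⟨hhead, htail⟩ := hp
    by_cases hpred : 0 < state_Value_B p.2 ∧ state_Size_B p.2 ≤ pvT
    · right
      refine ⟨p, by simp, hpred, by simp [pvScanB, hpred], ?_⟩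
      intro q hq _
      rcases List.mem_cons.mp hq with h | h
      · subst h; exact le_refl _
      · exact le_of_lt (hhead q h)
    · have hscan : pvScanB (p :: rest) = pvScanB rest := by simp [pvScanB, hpred]
      rcases ih htail with ⟨heq, hall⟩ | ⟨q, hq, hqpred, heq, hmin⟩
      · left
        refine ⟨by rw [hscan, heq], ?_⟩
        intro r hr
        rcases List.mem_cons.mp hr with h | h
        · subst h; exact hpred
        · exact hall r h
      · right
        refine ⟨q, by simp [hq], hqpred, by rw [hscan, heq], ?_⟩
        intro r hr hrpred
        rcases List.mem_cons.mp hr with h | h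
        · subst h; exact absurd hrpred hpred
        · exact hmin r h hrpred

-- the lexicographic key comparison, in elementary terms
lemma pv_key_le_iff (p q : Int × List Int) :
    pvKey p ≤ pvKey q ↔
      state_Value_B q.2 < state_Value_B p.2 ∨
        (state_Value_B p.2 = state_Value_B q.2 ∧ p.1 ≤ q.1) := by
  simp only [pvKey, Prod.Lex.toLex_le_toLex]
  omega

-- ===== VERDICT (by name: the statement is the Claim_ definition above) =====
theorem state_Select_spec : Claim_equal_state_Select := by
  intro si _ hpre
  unfold Spec_state_Select
  -- rewrite A's loop into the fold of its body over the enumeration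
  have hA : state_Select si =
      (if ((PySem.List.enumerate si 0).foldl
          (fun (acc : Int × Int) p =>
            if state_Size_B p.2 ≤ pvT ∧ acc.2 < state_Value_B p.2
            then (p.1, state_Value_B p.2) else acc) (-1, 0)).1 = -1
        then (false, [])
        else (true, PySem.List.pyGetD si ((PySem.List.enumerate si 0).foldl
          (fun (acc : Int × Int) p =>
            if state_Size_B p.2 ≤ pvT ∧ acc.2 < state_Value_B p.2
            then (p.1, state_Value_B p.2) else acc) (-1, 0)).1 [])) := by
    have h1 := pv_fold_enum
      (fun (a : Int × Int) (i : Int) (st : List Int) =>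
        if state_Verify_A st = true ∧ state_Value_A st > a.2 then (i, state_Value_A st) else a)
      ([] : List Int) si (-1, 0)
    have h2 : (PySem.List.enumerate si 0).foldl
        (fun (a : Int × Int) p =>
          if state_Verify_A p.2 = true ∧ state_Value_A p.2 > a.2 then (p.1, state_Value_A p.2) else a)
        (-1, 0)
        = (PySem.List.enumerate si 0).foldl
        (fun (acc : Int × Int) p =>
          if state_Size_B p.2 ≤ pvT ∧ acc.2 < state_Value_B p.2
          then (p.1, state_Value_B p.2) else acc) (-1, 0) := by
      apply PySem.List.foldl_congr_mem
      intro a p hp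
      rw [pv_val_eq p.2]
      have hver : (state_Verify_A p.2 = true) = (state_Size_B p.2 ≤ pvT) := by
        simp [state_Verify_A, pv_size_eq p.2]
      by_cases hc : state_Size_B p.2 ≤ pvT ∧ a.2 < state_Value_B p.2
      · rw [if_pos (by rw [hver]; exact hc), if_pos hc]
      · rw [if_neg (by rw [hver]; exact hc), if_neg hc]
    simp only [state_Select]
    rw [h1, h2]
  rw [hA]
  -- rewrite B into the scan of the sorted enumeration
  have hB : state_Select_alt si
      = pvScanB (PySem.List.sorted (PySem.List.enumerate si 0) pvKey false) := by
    simp only [state_Select_alt, pv_sorted2_eq]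
  rw [hB]
  -- both sides, characterised
  set E := PySem.List.enumerate si 0 with hE
  set js := PySem.List.sorted E pvKey false with hjs
  have hperm : js.Perm E := PySem.List.sorted_perm E pvKey false
  have hfold : E.foldl
      (fun (acc : Int × Int) p =>
        if state_Size_B p.2 ≤ pvT ∧ acc.2 < state_Value_B p.2
        then (p.1, state_Value_B p.2) else acc) (-1, 0)
      = (pvCands si).foldl pvStep' (-1, 0) := pv_fold_filter_map E (-1, 0)
  rw [hfold]
  -- membership bridge between candidates and the enumeration
  have hcand_mem : ∀ c ∈ pvCands si, ∃ p ∈ E, state_Size_B p.2 ≤ pvT ∧ c = (p.1, state_Value_B p.2) := by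
    intro c hc
    obtain ⟨p, hp, hcp⟩ := List.mem_map.mp hc
    have := List.mem_filter.mp hp
    exact ⟨p, this.1, by simpa using this.2, hcp.symm⟩
  have hmem_cand : ∀ p ∈ E, state_Size_B p.2 ≤ pvT → (p.1, state_Value_B p.2) ∈ pvCands si := by
    intro p hp hs
    exact List.mem_map.mpr ⟨p, List.mem_filter.mpr ⟨hp, by simpa using hs⟩, rfl⟩
  rcases pv_argmax (pvCands si) (pv_cands_pairwise si) with ⟨heq, hall⟩ | ⟨hmem, hpos, hmin⟩
  · -- A found nothing: no candidate has positive value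
    rw [heq]
    simp only [reduceIte]
    rcases pv_scan_char js (pv_sorted_strict si) with ⟨hsc, -⟩ | ⟨p, hpjs, hpred, hsc, -⟩
    · rw [hsc]
    · exfalso
      have hpE : p ∈ E := hperm.mem_iff.mp hpjs
      have := hall (p.1, state_Value_B p.2) (hmem_cand p hpE hpred.2)
      simp at this
      omega
  · -- A found a best candidate
    set r := (pvCands si).foldl pvStep' ((-1 : Int), (0 : Int)) with hr
    obtain ⟨pA, hpAE, hpAs, hrp⟩ := hcand_mem r hmem
    have hpApred : 0 < state_Value_B pA.2 ∧ state_Size_B pA.2 ≤ pvT := by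
      refine ⟨?_, hpAs⟩
      have : r.2 = state_Value_B pA.2 := by rw [hrp]
      omega
    have hr1 : r.1 = pA.1 := by rw [hrp]
    have hr2 : r.2 = state_Value_B pA.2 := by rw [hrp]
    have hne : ¬ r.1 = -1 := by
      have := pv_enum_fst_nonneg (xs := si) (by rw [← hE]; exact hpAE)
      omega
    rw [if_neg hne]
    rcases pv_scan_char js (pv_sorted_strict si) with ⟨-, hnone⟩ | ⟨p, hpjs, hpred, hsc, hminB⟩
    · exfalso
      exact hnone pA (hperm.mem_iff.mpr hpAE) hpApred
    · rw [hsc]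
      -- the two selected pairs coincide
      have hpE : p ∈ E := hperm.mem_iff.mp hpjs
      have h1 : pvKey p ≤ pvKey pA := hminB pA (hperm.mem_iff.mpr hpAE) hpApred
      have h2 : pvKey pA ≤ pvKey p := by
        have hcp : (p.1, state_Value_B p.2) ∈ pvCands si := hmem_cand p hpE hpred.2
        have := hmin (p.1, state_Value_B p.2) hcp
        rw [pv_key_le_iff]
        simp only at this
        rcases this with h | ⟨h, h'⟩
        · left; omega
        · right; exact ⟨by omega, by omega⟩
      have hkey : pvKey pA = pvKey p := le_antisymm h2 h1
      have hfst : pA.1 = p.1 := by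
        have := congrArg (fun k => (ofLex k).2) hkey
        simpa [pvKey] using this
      have hpeq : pA = p := pv_enum_fst_inj hpAE hpE hfst
      have hget : PySem.List.pyGetD si r.1 [] = pA.2 := by
        rw [hr1]
        exact pv_enum_pyGetD [] (by rw [← hE]; exact hpAE)
      rw [hget, hpeq]
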